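-- pv_equiv track=rewrite | github.com/hugo-mateus/MC102 | lab 06/lab06.py | multiplica_todos
-- ===== SOURCE A (Python) =====
-- def multiplica_todos(lista_1: list[int], lista_2: list[int]) -> list[int]:
--     lista_resultante = []
--     elemento = 0
--     for i in range(len(lista_1)+1):
--         if i > 0:
--             lista_resultante.append(elemento)
--             elemento = 0
--         if i == len(lista_1):
--             return lista_resultante
--         for x in range(len(lista_2)):
--             elemento += lista_1[i] * lista_2[x]
--     return lista_resultante
-- ===== SOURCE B (Python) =====
-- def multiplica_todos(lista_1: list[int], lista_2: list[int]) -> list[int]: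
--     s = 0
--     for y in lista_2:
--         s += y
--     return [x * s for x in lista_1]
-- ===== Notes on version B (the rewrite author's own statement) =====
-- stated objective: faster
-- what changed: B precomputes s = sum(lista_2) once and maps x*s over lista_1, replacing A's rescanning of lista_2 for every element and its range(len+1)/early-return accumulator scaffolding.
import Mathlib
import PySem

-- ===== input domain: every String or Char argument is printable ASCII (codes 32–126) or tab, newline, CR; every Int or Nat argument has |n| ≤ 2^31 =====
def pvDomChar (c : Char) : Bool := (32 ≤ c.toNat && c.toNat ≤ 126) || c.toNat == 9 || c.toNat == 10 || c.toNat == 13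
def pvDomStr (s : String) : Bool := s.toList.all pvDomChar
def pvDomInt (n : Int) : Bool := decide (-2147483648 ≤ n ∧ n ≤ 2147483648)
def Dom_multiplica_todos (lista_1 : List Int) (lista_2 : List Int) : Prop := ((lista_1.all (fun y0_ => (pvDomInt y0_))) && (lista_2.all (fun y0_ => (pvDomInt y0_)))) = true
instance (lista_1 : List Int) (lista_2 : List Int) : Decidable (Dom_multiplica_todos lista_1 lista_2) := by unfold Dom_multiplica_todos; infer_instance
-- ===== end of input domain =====

-- B replaces A's O(n*m) nested rescanning of lista_2 by one precomputed sum and a single map (objective: faster).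

-- ===== PORT A =====
-- the outer 'for i in range(len(lista_1)+1)' with its early return, transcribed as recursion on i
def multAux (lista_1 lista_2 res : List Int) (elemento : Int) (i : Nat) : List Int :=
  let res1 := if i > 0 then res ++ [elemento] else res
  let elem1 : Int := if i > 0 then 0 else elemento
  if i = lista_1.length then res1
  else if h : i < lista_1.length then
    -- for x in range(len(lista_2)): elemento += lista_1[i] * lista_2[x]
    let e := (PySem.List.pyRange 0 lista_2.length 1).foldl
      (fun acc x => acc + PySem.List.pyGetD lista_1 (i : Int) 0 * PySem.List.pyGetD lista_2 x 0) elem1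
    multAux lista_1 lista_2 res1 e (i + 1)
  else res  -- Python's trailing 'return lista_resultante' (unreachable from i = 0)
termination_by lista_1.length - i

def multiplica_todos (lista_1 : List Int) (lista_2 : List Int) : List Int :=
  multAux lista_1 lista_2 [] 0 0

-- ===== PORT B =====
def multiplica_todos_alt (lista_1 : List Int) (lista_2 : List Int) : List Int :=
  let s := lista_2.foldl (fun acc y => acc + y) 0
  lista_1.map (fun x => x * s)

-- ===== PRECONDITION & SPEC =====
def Spec_multiplica_todos (lista_1 : List Int) (lista_2 : List Int) (out : List Int) : Prop := out = multiplica_todos_alt lista_1 lista_2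
instance (lista_1 : List Int) (lista_2 : List Int) (out : List Int) : Decidable (Spec_multiplica_todos lista_1 lista_2 out) := by unfold Spec_multiplica_todos; infer_instance

-- ===== CLAIM (what is proved, stated in full; the proofs are below) =====
def Claim_equal_multiplica_todos : Prop := ∀ (lista_1 : List Int) (lista_2 : List Int), Dom_multiplica_todos lista_1 lista_2 → Spec_multiplica_todos lista_1 lista_2 (multiplica_todos lista_1 lista_2)

-- ===== LEMMAS AND PROOFS =====

theorem foldl_add_mul (a : Int) (l : List Int) :
    ∀ c : Int, l.foldl (fun acc y => acc + a * y) c = c + a * l.sum := by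
  induction l with
  | nil => simp
  | cons y t ih => intro c; simp [List.foldl_cons, ih]; ring

theorem foldl_add_eq_sum (l : List Int) : ∀ c : Int, l.foldl (fun acc y => acc + y) c = c + l.sum := by
  induction l with
  | nil => simp
  | cons y t ih => intro c; simp [List.foldl_cons, ih]; ring

theorem multAux_eq (lista_1 lista_2 : List Int) :
    ∀ (n i : Nat) (res : List Int) (elemento : Int), lista_1.length - i ≤ n → i ≤ lista_1.length →
      (i = 0 → elemento = 0) →
      multAux lista_1 lista_2 res elemento i =
        (if i > 0 then res ++ [elemento] else res) ++
          ((lista_1.drop i).map (fun x => x * lista_2.sum)) := by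
  intro n
  induction n with
  | zero =>
    intro i res elemento hn hi _
    have hEq : i = lista_1.length := by omega
    rw [multAux]
    simp [hEq]
  | succ n ih =>
    intro i res elemento hn hi h0
    rw [multAux]
    by_cases hEq : i = lista_1.length
    · simp [hEq]
    · have hlt : i < lista_1.length := by omega
      simp only [hEq, if_false, hlt, dif_pos]
      have hfold :
          ∀ c : Int, (PySem.List.pyRange 0 (lista_2.length : Int) 1).foldl
            (fun acc x => acc + PySem.List.pyGetD lista_1 (i : Int) 0 * PySem.List.pyGetD lista_2 x 0) c
          = c + PySem.List.pyGetD lista_1 (i : Int) 0 * lista_2.sum := by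
        intro c
        rw [PySem.List.foldl_pyRange_zero_pyGetD' lista_2 0
              (fun acc y => acc + PySem.List.pyGetD lista_1 (i : Int) 0 * y) c]
        exact foldl_add_mul _ _ _
      rw [ih (i + 1) _ _ (by omega) (by omega) (by omega)]
      have hget : PySem.List.pyGetD lista_1 (i : Int) 0 = lista_1[i] := by
        have := PySem.List.pyGetD_eq_getElem (xs := lista_1) (i := (i : Int)) (d := (0 : Int))
          (Int.natCast_nonneg i) (by exact_mod_cast hlt)
        simpa using this
      have hdrop : lista_1.drop i = lista_1[i] :: lista_1.drop (i + 1) :=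
        List.drop_eq_getElem_cons hlt
      by_cases hz : i = 0
      · subst hz
        simp only [gt_iff_lt, Nat.lt_irrefl, if_false, Nat.zero_lt_succ, if_true]
        rw [hfold, hget, h0 rfl]
        simp only [hdrop, List.map_cons]
        simp
      · have hpos : 0 < i := Nat.pos_of_ne_zero hz
        simp only [gt_iff_lt, hpos, if_true, Nat.zero_lt_succ]
        rw [hfold, hget]
        simp only [hdrop, List.map_cons]
        simp

-- ===== VERDICT (by name: the statement is the Claim_ definition above) =====
theorem multiplica_todos_spec : Claim_equal_multiplica_todos := by
  intro lista_1 lista_2 _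
  unfold Spec_multiplica_todos multiplica_todos multiplica_todos_alt
  rw [multAux_eq lista_1 lista_2 lista_1.length 0 [] 0 (by omega) (by omega) (fun _ => rfl)]
  simp [foldl_add_eq_sum]
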